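-- pv_equiv track=rewrite | github.com/GigaClutch/philosophical-concept-map | con_mapper_2/concept_comparator.py | _find_common_concepts
-- ===== SOURCE A (Python) =====
-- from typing import Dict, List, Set, Tuple, Any, Optional
--
-- def _find_common_concepts(concept_sets: Dict[str, List[str]]) -> List[str]:
--     """
--     Find concepts that appear across multiple source concepts.
--
--     Args:
--         concept_sets: Dictionary mapping concept names to their related concepts
--
--     Returns:
--         List of concepts common to all source concepts
--     """
--     all_sets = list(concept_sets.values())
--     if not all_sets:
--         return []
--
--     # Start with the first set and find intersection with others
--     common = set(all_sets[0])
--     for concept_set in all_sets[1:]: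
--         common = common.intersection(set(concept_set))
--
--     return sorted(list(common))
-- ===== SOURCE B (Python) =====
-- def _find_common_concepts(concept_sets):
--     """Single-pass frequency count: a concept is common iff its per-source
--     presence count equals the number of sources."""
--     counts = {}
--     for lst in concept_sets.values():
--         for c in dict.fromkeys(lst):  # dedupe within one source, stable order
--             counts[c] = counts.get(c, 0) + 1
--     n = len(concept_sets)
--     return sorted(c for c, k in counts.items() if k == n)
-- ===== Notes on version B (the rewrite author's own statement) =====
-- stated objective: alternative
-- what changed: Replaces the iterated set-intersection across sources by one pass that counts each concept's per-source presence (deduping within each source) and selects concepts whose count equals the number of sources, then sorts.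
import Mathlib
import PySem

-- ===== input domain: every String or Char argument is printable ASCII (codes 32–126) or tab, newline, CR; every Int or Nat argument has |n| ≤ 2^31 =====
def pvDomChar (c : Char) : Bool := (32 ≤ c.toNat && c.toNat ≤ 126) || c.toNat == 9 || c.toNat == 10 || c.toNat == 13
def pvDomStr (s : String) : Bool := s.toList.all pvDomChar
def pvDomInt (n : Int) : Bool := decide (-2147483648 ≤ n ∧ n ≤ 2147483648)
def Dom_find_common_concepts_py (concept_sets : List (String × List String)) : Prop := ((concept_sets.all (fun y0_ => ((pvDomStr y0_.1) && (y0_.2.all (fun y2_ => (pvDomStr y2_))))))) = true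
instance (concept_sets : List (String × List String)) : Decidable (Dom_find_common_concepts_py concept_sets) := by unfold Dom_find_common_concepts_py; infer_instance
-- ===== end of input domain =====

-- B counts per-source presence in one dict pass and keeps concepts seen in every source; alternative decomposition, same cost.


-- ===== PORT A =====
def find_common_concepts_py (concept_sets : List (String × List String)) : List String :=
  let all_sets := (PySem.Dict.ofList concept_sets).values
  match all_sets with
  | [] => []
  | first :: rest =>
      let common := rest.foldl (fun common concept_set => PySem.Set.inter common (PySem.Set.ofList concept_set)) (PySem.Set.ofList first)
      PySem.List.sorted common (fun x => x) false

-- ===== PORT B =====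
def find_common_concepts_py_alt (concept_sets : List (String × List String)) : List String :=
  let d := PySem.Dict.ofList concept_sets
  let counts := d.values.foldl
      (fun counts lst => (PySem.List.dedup lst).foldl (fun c x => c.insert x (c.getD x 0 + 1)) counts)
      (PySem.Dict.empty : PySem.Dict String Int)
  let n : Int := (d.size : Int)
  PySem.List.sorted ((counts.items.filter (fun p => p.2 == n)).map (fun p => p.1)) (fun x => x) false

-- ===== PRECONDITION & SPEC =====
def Spec_find_common_concepts_py (concept_sets : List (String × List String)) (out : List String) : Prop := out = find_common_concepts_py_alt concept_sets
instance (concept_sets : List (String × List String)) (out : List String) : Decidable (Spec_find_common_concepts_py concept_sets out) := by unfold Spec_find_common_concepts_py; infer_instance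

-- ===== CLAIM (what is proved, stated in full; the proofs are below) =====
def Claim_equal_find_common_concepts_py : Prop := ∀ (concept_sets : List (String × List String)), Dom_find_common_concepts_py concept_sets → Spec_find_common_concepts_py concept_sets (find_common_concepts_py concept_sets)

-- ===== LEMMAS AND PROOFS =====

-- abbreviation for B's counting step (proof-local)
def pvStep (c : PySem.Dict String Int) (lst : List String) : PySem.Dict String Int :=
  (PySem.List.dedup lst).foldl (fun c x => c.insert x (c.getD x 0 + 1)) c

theorem pv_getD_step (V : List (List String)) (d : PySem.Dict String Int) (x : String) :
    (V.foldl pvStep d).getD x 0 = d.getD x 0 + (V.countP (fun lst => decide (x ∈ lst)) : Int) := by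
  induction V generalizing d with
  | nil => simp
  | cons hd tl ih =>
      simp only [List.foldl_cons, pvStep, PySem.List.dedup_eq_ofList, ih,
        PySem.Dict.getD_foldl_insert_add_one, List.countP_cons]
      by_cases h : x ∈ hd
      · rw [List.count_eq_one_of_mem (PySem.Set.nodup_ofList hd) (by simp [h])]
        simp [h]; ring
      · rw [List.count_eq_zero.mpr (fun hm => h (by simpa using hm))]
        simp [h]

theorem pv_keys_step (V : List (List String)) (d : PySem.Dict String Int) (x : String) :
    x ∈ (V.foldl pvStep d).keys ↔ x ∈ d.keys ∨ ∃ lst ∈ V, x ∈ lst := by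
  induction V generalizing d with
  | nil => simp
  | cons hd tl ih =>
      simp only [List.foldl_cons, ih, pvStep, PySem.Dict.keys_foldl_insert]
      rw [PySem.Set.mem_update]
      simp
      tauto

theorem pv_nodup_keys_step (V : List (List String)) (d : PySem.Dict String Int) (h : d.keys.Nodup) :
    (V.foldl pvStep d).keys.Nodup := by
  induction V generalizing d with
  | nil => exact h
  | cons hd tl ih =>
      exact ih _ (PySem.Dict.nodup_keys_foldl_insert _ _ _ h)

theorem pv_mem_inter_fold (rest : List (List String)) (acc : PySem.Set String) (x : String) :
    x ∈ rest.foldl (fun common concept_set => PySem.Set.inter common (PySem.Set.ofList concept_set)) acc ↔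
      x ∈ acc ∧ ∀ s ∈ rest, x ∈ s := by
  induction rest generalizing acc with
  | nil => simp
  | cons hd tl ih =>
      simp only [List.foldl_cons, ih, PySem.Set.mem_inter, PySem.Set.mem_ofList, List.mem_cons]
      constructor
      · rintro ⟨⟨h1, h2⟩, h3⟩; exact ⟨h1, fun s hs => hs.elim (fun e => e ▸ h2) (h3 s)⟩
      · rintro ⟨h1, h2⟩; exact ⟨⟨h1, h2 hd (Or.inl rfl)⟩, fun s hs => h2 s (Or.inr hs)⟩

theorem pv_nodup_inter_fold (rest : List (List String)) (acc : PySem.Set String) (h : acc.Nodup) :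
    (rest.foldl (fun common concept_set => PySem.Set.inter common (PySem.Set.ofList concept_set)) acc).Nodup := by
  induction rest generalizing acc with
  | nil => exact h
  | cons hd tl ih => exact ih _ (PySem.Set.nodup_inter acc (PySem.Set.ofList hd) h)

-- ===== VERDICT (by name: the statement is the Claim_ definition above) =====
theorem find_common_concepts_py_spec : Claim_equal_find_common_concepts_py := by
  intro cs _
  unfold Spec_find_common_concepts_py find_common_concepts_py find_common_concepts_py_alt
  simp only []
  set d := PySem.Dict.ofList cs with hd
  have hsize : d.size = d.values.length := by
    simp [PySem.Dict.size, PySem.Dict.values]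
  have hnd : (List.foldl pvStep PySem.Dict.empty d.values).keys.Nodup :=
    pv_nodup_keys_step _ _ (by simp)
  cases hVe : d.values with
  | nil => rfl
  | cons first rest =>
      rw [hVe] at hnd
      have hn : ((d.size : Int)) = (((first :: rest) : List (List String)).length : Int) := by
        rw [hsize, hVe]
      show PySem.List.sorted
          (rest.foldl (fun common concept_set => PySem.Set.inter common (PySem.Set.ofList concept_set)) (PySem.Set.ofList first))
          (fun x => x) false
        = PySem.List.sorted
          (((((first :: rest).foldl pvStep PySem.Dict.empty).items.filter (fun p => p.2 == (d.size : Int))).map (fun p => p.1)))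
          (fun x => x) false
      set C := (first :: rest).foldl pvStep PySem.Dict.empty with hC
      have hCitems : C.items = C.keys.map (fun k => (k, C.getD k 0)) :=
        PySem.Dict.items_eq_map_keys C hnd 0
      have hBlist : (C.items.filter (fun p => p.2 == (d.size : Int))).map (fun p => p.1)
          = C.keys.filter (fun k => C.getD k 0 == (d.size : Int)) := by
        rw [hCitems, List.filter_map, List.map_map]
        simp [Function.comp_def]
      rw [hBlist, PySem.List.sorted_id_eq_sorted_id_iff_perm]
      apply (List.perm_ext_iff_of_nodup
        (pv_nodup_inter_fold rest _ (PySem.Set.nodup_ofList first))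
        (List.Nodup.filter _ hnd)).mpr
      intro x
      rw [pv_mem_inter_fold, List.mem_filter]
      have hkeys := pv_keys_step (first :: rest) PySem.Dict.empty x
      have hgetD := pv_getD_step (first :: rest) PySem.Dict.empty x
      rw [← hC] at hkeys hgetD
      have hval : ((C.getD x 0 == (d.size : Int)) = true) ↔ ∀ lst ∈ (first :: rest), x ∈ lst := by
        rw [beq_iff_eq, hgetD, hn]
        constructor
        · intro h
          have hcnt : ((first :: rest) : List (List String)).countP (fun lst => decide (x ∈ lst))
              = ((first :: rest) : List (List String)).length := by
            have h' : ((((first :: rest) : List (List String)).countP (fun lst => decide (x ∈ lst)) : Int))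
                = (((first :: rest) : List (List String)).length : Int) := by simpa using h
            exact_mod_cast h'
          exact fun lst hl => of_decide_eq_true (List.countP_eq_length.mp hcnt lst hl)
        · intro h
          have := List.countP_eq_length.mpr (fun a ha => decide_eq_true (h a ha))
          simp [this]
      rw [hval, hkeys]
      constructor
      · rintro ⟨h1, h2⟩
        have hall : ∀ lst ∈ (first :: rest), x ∈ lst := by
          intro lst hl
          rcases List.mem_cons.mp hl with rfl | hm
          · simpa using h1
          · exact h2 _ hm
        exact ⟨Or.inr ⟨first, List.mem_cons_self, by simpa using h1⟩, hall⟩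
      · rintro ⟨-, hall⟩
        exact ⟨by simpa using hall first List.mem_cons_self,
          fun s hs => hall s (List.mem_cons_of_mem _ hs)⟩
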